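-- pv_equiv track=rewrite | github.com/vvindetta/lucy_notes_daemon | lucy_notes_manager/modules/plasma_sync.py | _replace_bold_region_preserve
-- ===== SOURCE A (Python) =====
-- from typing import Dict, List, Optional, Tuple
--
-- def _replace_bold_region_preserve(
--     line: List[Tuple[str, bool]],
--     item: str,
-- ) -> List[Tuple[str, bool]]:
--     """
--     Replace the region from first bold segment to last bold segment with ONE bold tuple (item),
--     keeping the non-bold prefix and suffix intact.
--     This prevents losing list prefix like "- ".
--     """
--     idxs = [i for i, (_t, b) in enumerate(line) if b]
--     if not idxs:
--         return line
--
--     first = idxs[0]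
--     last = idxs[-1]
--
--     out: List[Tuple[str, bool]] = []
--     for i in range(0, first):
--         t, _b = line[i]
--         out.append((t, False))
--
--     out.append((item, True))
--
--     for i in range(last + 1, len(line)):
--         t, _b = line[i]
--         out.append((t, False))
--
--     return out
-- ===== SOURCE B (Python) =====
-- from typing import Dict, List, Optional, Tuple
--
-- def _replace_bold_region_preserve(
--     line: List[Tuple[str, bool]],
--     item: str,
-- ) -> List[Tuple[str, bool]]:
--     """Single streaming pass instead of precomputing bold indices: emit the
--     non-bold prefix, one bold tuple at the first bold segment, then buffer
--     later non-bold segments, discarding the buffer whenever another bold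
--     segment appears; the buffer that survives the loop is the true suffix."""
--     out: List[Tuple[str, bool]] = []
--     pending: List[Tuple[str, bool]] = []
--     seen_bold = False
--     for t, b in line:
--         if b:
--             if not seen_bold:
--                 out.append((item, True))
--                 seen_bold = True
--             pending = []
--         elif seen_bold:
--             pending.append((t, False))
--         else:
--             out.append((t, False))
--     if not seen_bold:
--         return line
--     return out + pending
-- ===== Notes on version B (the rewrite author's own statement) =====
-- stated objective: alternative
-- what changed: Replaces the index-precomputation (enumerate to collect bold indices, then two index-range loops rebuilding prefix and suffix) with a single streaming pass over the segments that keeps an output list plus a pending buffer cleared at each bold segment.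
import Mathlib
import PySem

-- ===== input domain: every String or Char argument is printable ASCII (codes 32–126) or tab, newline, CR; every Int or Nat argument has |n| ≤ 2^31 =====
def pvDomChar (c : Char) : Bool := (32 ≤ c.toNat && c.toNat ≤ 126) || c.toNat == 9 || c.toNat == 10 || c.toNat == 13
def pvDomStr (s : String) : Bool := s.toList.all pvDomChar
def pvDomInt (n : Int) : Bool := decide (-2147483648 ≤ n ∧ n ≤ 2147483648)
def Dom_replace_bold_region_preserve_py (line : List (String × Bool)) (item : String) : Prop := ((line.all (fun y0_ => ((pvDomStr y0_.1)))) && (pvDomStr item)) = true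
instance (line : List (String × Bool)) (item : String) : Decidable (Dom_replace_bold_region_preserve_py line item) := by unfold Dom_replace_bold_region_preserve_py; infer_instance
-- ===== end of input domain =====

-- B replaces A's bold-index precomputation by a single streaming pass with a pending buffer (alternative decomposition, same cost).

-- ===== PORT A =====
def replace_bold_region_preserve_py (line : List (String × Bool)) (item : String) : List (String × Bool) :=
  -- idxs = [i for i, (_t, b) in enumerate(line) if b]
  let idxs : List Int :=
    (PySem.List.enumerate line).foldl (fun acc p => if p.2.2 then acc ++ [p.1] else acc) []
  if idxs = [] then line
  else
    let first := idxs.headD 0        -- idxs[0]  (idxs nonempty here)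
    let last := idxs.getLastD 0      -- idxs[-1] (idxs nonempty here)
    let out : List (String × Bool) :=
      (PySem.List.pyRange 0 first).foldl
        (fun acc i => acc ++ [((PySem.List.pyGetD line i ("", false)).1, false)]) []
    let out := out ++ [(item, true)]
    (PySem.List.pyRange (last + 1) (PySem.List.len line)).foldl
      (fun acc i => acc ++ [((PySem.List.pyGetD line i ("", false)).1, false)]) out

-- ===== PORT B =====
def pvBStep (item : String) :
    List (String × Bool) × List (String × Bool) × Bool → String × Bool →
    List (String × Bool) × List (String × Bool) × Bool :=
  fun st tb =>
    if tb.2 then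
      ((if st.2.2 then st.1 else st.1 ++ [(item, true)]), [], true)
    else if st.2.2 then (st.1, st.2.1 ++ [(tb.1, false)], true)
    else (st.1 ++ [(tb.1, false)], st.2.1, false)

def replace_bold_region_preserve_py_alt (line : List (String × Bool)) (item : String) : List (String × Bool) :=
  let st := line.foldl (pvBStep item) ([], [], false)
  if st.2.2 then st.1 ++ st.2.1 else line

-- ===== PRECONDITION & SPEC =====
def Spec_replace_bold_region_preserve_py (line : List (String × Bool)) (item : String) (out : List (String × Bool)) : Prop := out = replace_bold_region_preserve_py_alt line item
instance (line : List (String × Bool)) (item : String) (out : List (String × Bool)) : Decidable (Spec_replace_bold_region_preserve_py line item out) := by unfold Spec_replace_bold_region_preserve_py; infer_instance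

-- ===== CLAIM (what is proved, stated in full; the proofs are below) =====
def Claim_equal_replace_bold_region_preserve_py : Prop := ∀ (line : List (String × Bool)) (item : String), Dom_replace_bold_region_preserve_py line item → Spec_replace_bold_region_preserve_py line item (replace_bold_region_preserve_py line item)

-- ===== LEMMAS AND PROOFS =====

-- shared shape functions (proof-only): stripped prefix, suffix after the last bold, their index bounds
def pvStrip (l : List (String × Bool)) : List (String × Bool) := l.map (fun p => (p.1, false))

def pvPfx : List (String × Bool) → List (String × Bool)
  | [] => []
  | x :: l => if x.2 then [] else (x.1, false) :: pvPfx l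

def pvSuffix : List (String × Bool) → List (String × Bool)
  | [] => []
  | x :: l => if l.any (·.2) then pvSuffix l else if x.2 then pvStrip l else (x.1, false) :: pvSuffix l

-- pvPfxLen = index of the first bold, pvCut = one past the index of the last bold (when a bold exists)
def pvPfxLen : List (String × Bool) → Nat
  | [] => 0
  | x :: l => if x.2 then 0 else pvPfxLen l + 1

def pvCut : List (String × Bool) → Nat
  | [] => 0
  | x :: l => if l.any (·.2) then pvCut l + 1 else if x.2 then 1 else 0

def pvBoldIdxs : List (String × Bool) → Int → List Int
  | [], _ => []
  | x :: l, k => if x.2 then k :: pvBoldIdxs l (k + 1) else pvBoldIdxs l (k + 1)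

theorem pvBoldIdxs_spec (l : List (String × Bool)) : ∀ (k : Int) (acc : List Int),
    (PySem.List.enumerate l k).foldl (fun acc p => if p.2.2 then acc ++ [p.1] else acc) acc
      = acc ++ pvBoldIdxs l k := by
  induction l with
  | nil => intro k acc; simp [PySem.List.enumerate, pvBoldIdxs]
  | cons x l ih =>
      intro k acc
      simp only [PySem.List.enumerate, List.foldl_cons, pvBoldIdxs]
      by_cases hx : x.2 <;> simp [hx, ih]

theorem pvBoldIdxs_nil_iff (l : List (String × Bool)) : ∀ k, (pvBoldIdxs l k = [] ↔ l.any (·.2) = false) := by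
  induction l with
  | nil => simp [pvBoldIdxs]
  | cons x l ih =>
      intro k
      by_cases hx : x.2 <;> simp [pvBoldIdxs, hx, ih]

theorem pvBoldIdxs_headD (l : List (String × Bool)) : ∀ k, l.any (·.2) = true →
    (pvBoldIdxs l k).headD 0 = k + (pvPfxLen l : Int) := by
  induction l with
  | nil => simp
  | cons x l ih =>
      intro k h
      by_cases hx : x.2
      · simp [pvBoldIdxs, pvPfxLen, hx]
      · have hl : l.any (·.2) = true := by simpa [hx] using h
        simp only [pvBoldIdxs, pvPfxLen, hx, Bool.false_eq_true, ite_false]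
        rw [ih (k + 1) hl]; push_cast; ring

theorem pvBoldIdxs_getLastD (l : List (String × Bool)) : ∀ k, l.any (·.2) = true →
    (pvBoldIdxs l k).getLastD 0 + 1 = k + (pvCut l : Int) := by
  induction l with
  | nil => simp
  | cons x l ih =>
      intro k h
      by_cases hl : l.any (·.2)
      · have hne : pvBoldIdxs l (k + 1) ≠ [] := by
          intro hnil; rw [pvBoldIdxs_nil_iff] at hnil; simp [hnil] at hl
        have hrec : (pvBoldIdxs l (k + 1)).getLastD 0 + 1 = (k + 1) + (pvCut l : Int) := ih (k + 1) hl
        obtain ⟨y, ys, hys⟩ := List.exists_cons_of_ne_nil hne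
        rw [hys] at hrec
        simp only [List.getLastD_cons] at hrec
        by_cases hx : x.2
        · simp only [pvBoldIdxs, pvCut, hx, hl, if_pos, hys]
          simp only [List.getLastD_cons]
          push_cast at hrec ⊢; omega
        · simp only [pvBoldIdxs, pvCut, hx, hl, Bool.false_eq_true, ite_false, if_pos, hys]
          simp only [List.getLastD_cons]
          push_cast at hrec ⊢; omega
      · have hx : x.2 = true := by
          rw [List.any_cons] at h
          simpa [Bool.or_eq_true, hl] using h
        have : pvBoldIdxs l (k + 1) = [] := (pvBoldIdxs_nil_iff l _).mpr (by simpa using hl)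
        simp [pvBoldIdxs, pvCut, hx, hl, this]

theorem pvPfxLen_le (l : List (String × Bool)) (h : l.any (·.2) = true) : pvPfxLen l ≤ l.length := by
  induction l with
  | nil => simp at h
  | cons x l ih =>
      by_cases hx : x.2
      · simp [pvPfxLen, hx]
      · have hl : l.any (·.2) = true := by simpa [hx] using h
        have := ih hl
        simp only [pvPfxLen, hx, Bool.false_eq_true, ite_false, List.length_cons]
        omega

theorem pvCut_le (l : List (String × Bool)) : pvCut l ≤ l.length := by
  induction l with
  | nil => simp [pvCut]
  | cons x l ih =>
      by_cases hl : l.any (·.2) <;> by_cases hx : x.2 <;>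
        simp only [pvCut, hl, hx, Bool.false_eq_true, ite_false, if_pos, List.length_cons] <;> omega

-- map over an index range equals map over a drop/take of the list
theorem pvMapRange_drop {β : Type} (f : String × Bool → β) (d : String × Bool) :
    ∀ (n : Nat) (l : List (String × Bool)) (m : Nat), l.length = m + n →
    (PySem.List.pyRange (m : Int) (l.length : Int)).map (fun i => f (PySem.List.pyGetD l i d))
      = (l.drop m).map f := by
  intro n
  induction n with
  | zero =>
      intro l m hm
      have hr : (PySem.List.pyRange (m : Int) (l.length : Int)) = [] := by
        rw [List.eq_nil_iff_forall_not_mem]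
        intro i hi
        rw [PySem.List.mem_pyRange_one] at hi
        omega
      rw [hr]
      simp [List.drop_of_length_le (by omega : l.length ≤ m)]
  | succ n ih =>
      intro l m hm
      have hlt : (m : Int) < (l.length : Int) := by exact_mod_cast (by omega : m < l.length)
      rw [PySem.List.pyRange_one_cons hlt, List.map_cons]
      have h1 : PySem.List.pyGetD l (m : Int) d = l[m]'(by omega) := by
        rw [PySem.List.pyGetD_eq_getElem l d (by positivity) hlt]; simp
      have h2 : ((m : Int) + 1) = ((m + 1 : Nat) : Int) := by push_cast; ring
      rw [h1, h2, ih l (m + 1) (by omega),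
        List.drop_eq_getElem_cons (by omega : m < l.length), List.map_cons]

theorem pvMapRange_take {β : Type} (f : String × Bool → β) (d : String × Bool) :
    ∀ (n : Nat) (l : List (String × Bool)), n ≤ l.length →
    (PySem.List.pyRange 0 (n : Int)).map (fun i => f (PySem.List.pyGetD l i d))
      = (l.take n).map f := by
  intro n
  induction n with
  | zero => intro l _; simp [(by decide : PySem.List.pyRange 0 0 = [])]
  | succ n ih =>
      intro l h
      have hc : ((n + 1 : Nat) : Int) = (n : Int) + 1 := by push_cast; ring
      have h1 : PySem.List.pyGetD l (n : Int) d = l[n]'(by omega) := by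
        rw [PySem.List.pyGetD_eq_getElem l d (by positivity) (by exact_mod_cast (by omega : n < l.length))]
        simp
      rw [hc, PySem.List.pyRange_one_succ_right (by positivity), List.map_append, ih l (by omega),
        List.take_add_one, List.getElem?_eq_getElem (by omega : n < l.length)]
      simp [h1]
      rw [List.take_add_one, List.getElem?_eq_getElem (by simpa using (show n < l.length by omega))]
      simp

theorem pvStrip_take (l : List (String × Bool)) : pvStrip (l.take (pvPfxLen l)) = pvPfx l := by
  induction l with
  | nil => simp [pvStrip, pvPfx, pvPfxLen]
  | cons x l ih =>
      by_cases hx : x.2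
      · simp [pvStrip, pvPfx, pvPfxLen, hx]
      · simp only [pvStrip, pvPfx, pvPfxLen, hx, Bool.false_eq_true, ite_false,
          List.take_succ_cons, List.map_cons]
        simpa [pvStrip] using ih

theorem pvStrip_drop (l : List (String × Bool)) (h : l.any (·.2) = true) :
    pvStrip (l.drop (pvCut l)) = pvSuffix l := by
  induction l with
  | nil => simp at h
  | cons x l ih =>
      by_cases hl : l.any (·.2)
      · simp only [pvCut, pvSuffix, hl, if_pos, List.drop_succ_cons]
        exact ih hl

      · have hx : x.2 = true := by
          rw [List.any_cons] at h
          simpa [Bool.or_eq_true, hl] using h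
        simp [pvCut, pvSuffix, hl, hx]

-- B's loop, bold already seen: out is frozen; pending becomes the suffix after the last bold
theorem pvFoldlSeen (item : String) (l : List (String × Bool)) :
    ∀ (out pending : List (String × Bool)),
    l.foldl (pvBStep item) (out, pending, true)
      = (out, (if l.any (·.2) then pvSuffix l else pending ++ pvStrip l), true) := by
  induction l with
  | nil => intro out pending; simp [pvStrip]
  | cons x l ih =>
      intro out pending
      by_cases hx : x.2
      · simp only [List.foldl_cons, pvBStep, hx, if_pos]
        rw [ih]
        by_cases hl : l.any (·.2) <;> simp [pvSuffix, hl, hx, pvStrip]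
      · simp only [List.foldl_cons, pvBStep, hx, Bool.false_eq_true, ite_false, if_pos]
        rw [ih]
        by_cases hl : l.any (·.2) <;> simp [pvSuffix, hl, hx, pvStrip]

-- B's loop from the start
theorem pvFoldlMain (item : String) (l : List (String × Bool)) :
    ∀ (out : List (String × Bool)),
    l.foldl (pvBStep item) (out, [], false)
      = if l.any (·.2) then (out ++ pvPfx l ++ [(item, true)], pvSuffix l, true)
        else (out ++ pvStrip l, [], false) := by
  induction l with
  | nil => intro out; simp [pvStrip]
  | cons x l ih =>
      intro out
      by_cases hx : x.2
      · simp only [List.foldl_cons, pvBStep, hx, if_pos, Bool.false_eq_true, ite_false]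
        rw [pvFoldlSeen]
        by_cases hl : l.any (·.2) <;> simp [pvSuffix, pvPfx, hl, hx]
      · simp only [List.foldl_cons, pvBStep, hx, Bool.false_eq_true, ite_false]
        rw [ih]
        by_cases hl : l.any (·.2) <;> simp [pvSuffix, pvPfx, pvStrip, hl, hx]

theorem pvAltEq (line : List (String × Bool)) (item : String) :
    replace_bold_region_preserve_py_alt line item
      = if line.any (·.2) then pvPfx line ++ [(item, true)] ++ pvSuffix line else line := by
  unfold replace_bold_region_preserve_py_alt
  rw [pvFoldlMain]
  by_cases h : line.any (·.2) <;> simp [h]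

theorem pvAEq (line : List (String × Bool)) (item : String) :
    replace_bold_region_preserve_py line item
      = if line.any (·.2) then pvPfx line ++ [(item, true)] ++ pvSuffix line else line := by
  unfold replace_bold_region_preserve_py
  dsimp only
  rw [pvBoldIdxs_spec, List.nil_append]
  by_cases h : line.any (·.2)
  · have hne : pvBoldIdxs line 0 ≠ [] := by
      intro hnil; rw [pvBoldIdxs_nil_iff] at hnil; simp [hnil] at h
    rw [if_neg hne, if_pos h]
    have hhead : (pvBoldIdxs line 0).headD 0 = ((pvPfxLen line : Nat) : Int) := by
      simpa using pvBoldIdxs_headD line 0 h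
    have hlast : (pvBoldIdxs line 0).getLastD 0 + 1 = ((pvCut line : Nat) : Int) := by
      simpa using pvBoldIdxs_getLastD line 0 h
    rw [hhead, hlast]
    rw [PySem.List.foldl_append_singleton_eq_map, PySem.List.foldl_append_singleton_eq_map]
    have hlen : PySem.List.len line = (line.length : Int) := by simp [PySem.List.len]
    rw [hlen]
    rw [pvMapRange_take (fun p => (p.1, false)) ("", false) (pvPfxLen line) line (pvPfxLen_le line h)]
    rw [pvMapRange_drop (fun p => (p.1, false)) ("", false) (line.length - pvCut line) line
      (pvCut line) (by have := pvCut_le line; omega)]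
    have h1 : (line.take (pvPfxLen line)).map (fun p => (p.1, false)) = pvPfx line := pvStrip_take line
    have h2 : (line.drop (pvCut line)).map (fun p => (p.1, false)) = pvSuffix line := pvStrip_drop line h
    rw [h1, h2]
    simp
  · have : pvBoldIdxs line 0 = [] := (pvBoldIdxs_nil_iff line 0).mpr (by simpa using h)
    rw [if_pos this, if_neg h]

-- ===== VERDICT (by name: the statement is the Claim_ definition above) =====
theorem replace_bold_region_preserve_py_spec : Claim_equal_replace_bold_region_preserve_py := by
  intro line item _
  unfold Spec_replace_bold_region_preserve_py
  rw [pvAEq, pvAltEq]
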